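-- pv_equiv track=rewrite | github.com/Hk4Fun/algorithm_offer | target_offer/28_2_字符串的组合.py | Combination2
-- ===== SOURCE A (Python) =====
-- def Combination2(string):
--     def combination(string):
--         if len(string) == 1:  # 只剩下一个字符时直接返回该字符
--             return [string]
--         result = []
--         for i in range(len(string)):  # 遍历string的每一个字符
--             result.append(string[i])  # 先添加该字符到组合结果中
--             for j in combination(string[i + 1:]): # 与前面的字符无关了
--                 result.append(string[i] + j)  # 再把该字符与后面部分的组合结果中的每一项拼接
--         return result
--
--     if not string:
--         return
--     return sorted(list(set(combination(string))))
-- ===== SOURCE B (Python) =====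
-- import itertools
--
-- def Combination2(string):
--     if not string:
--         return
--     res = set()
--     for r in range(1, len(string) + 1):
--         for combo in itertools.combinations(string, r):
--             res.add(''.join(combo))
--     return sorted(res)
-- ===== Notes on version B (the rewrite author's own statement) =====
-- stated objective: idiomatic
-- what changed: Replaces the recursive suffix decomposition (combination(string[i+1:]) inside a nested loop) by a flat length-indexed enumeration via itertools.combinations collected into a set, then sorted.
import Mathlib
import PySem

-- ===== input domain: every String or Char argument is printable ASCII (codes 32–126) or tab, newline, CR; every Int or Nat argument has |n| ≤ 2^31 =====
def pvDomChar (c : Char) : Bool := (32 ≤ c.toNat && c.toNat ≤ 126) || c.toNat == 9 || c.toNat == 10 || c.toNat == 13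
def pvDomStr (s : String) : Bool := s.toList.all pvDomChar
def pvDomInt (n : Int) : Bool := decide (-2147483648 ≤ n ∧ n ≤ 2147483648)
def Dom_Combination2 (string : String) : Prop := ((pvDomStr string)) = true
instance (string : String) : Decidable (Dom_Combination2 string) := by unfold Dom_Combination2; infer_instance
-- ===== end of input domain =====

-- B replaces A's recursive suffix decomposition by a flat length-indexed enumeration of
-- order-preserving combinations (itertools.combinations style) collected into a set; objective: idiomatic.

-- ===== PORT A =====
-- literal port of the nested recursive 'combination': the loop 'for i in range(len(string))'
-- is the structural recursion over suffixes (iteration i works on the suffix starting at i).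
mutual
def pvCombination (l : List Char) : List String :=
  if l.length = 1 then [String.ofList l] else pvCombLoop l
  termination_by 2 * l.length + 1

def pvCombLoop : List Char → List String
  | [] => []
  | c :: rest =>
      (String.ofList [c] :: (pvCombination rest).map (fun j => String.ofList [c] ++ j))
        ++ pvCombLoop rest
  termination_by l => 2 * l.length
end

def Combination2 (string : String) : Option (List String) :=
  if string = "" then none
  else some (PySem.List.sorted (PySem.Set.ofList (pvCombination string.toList)) (fun x => x) false)

-- ===== PORT B =====
-- hand port of itertools.combinations(l, k) in its enumeration order
def pvCombosLen : Nat → List Char → List (List Char)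
  | 0, _ => [[]]
  | _ + 1, [] => []
  | k + 1, c :: rest => (pvCombosLen k rest).map (fun t => c :: t) ++ pvCombosLen (k + 1) rest

def Combination2_alt (string : String) : Option (List String) :=
  if string = "" then none
  else
    let l := string.toList
    let res := (PySem.List.pyRange 1 (l.length + 1) 1).foldl
      (fun acc r => (pvCombosLen r.toNat l).foldl
        (fun a t => PySem.Set.add a (String.ofList t)) acc)
      PySem.Set.empty
    some (PySem.List.sorted res (fun x => x) false)

-- ===== PRECONDITION & SPEC =====
def Spec_Combination2 (string : String) (out : Option (List String)) : Prop := out = Combination2_alt string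
instance (string : String) (out : Option (List String)) : Decidable (Spec_Combination2 string out) := by unfold Spec_Combination2; infer_instance

-- ===== CLAIM (what is proved, stated in full; the proofs are below) =====
def Claim_equal_Combination2 : Prop := ∀ (string : String), Dom_Combination2 string → Spec_Combination2 string (Combination2 string)

-- ===== LEMMAS AND PROOFS =====

lemma pvCombination_nil : pvCombination [] = [] := by
  unfold pvCombination pvCombLoop; simp

lemma pvCombination_eq_loop (l : List Char) : pvCombination l = pvCombLoop l := by
  unfold pvCombination
  split
  · next h =>
    obtain ⟨c, rfl⟩ := List.length_eq_one_iff.mp h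
    unfold pvCombLoop
    simp [pvCombination_nil, pvCombLoop]
  · rfl

lemma mem_pvCombLoop :
    ∀ (l : List Char) (x : String),
      x ∈ pvCombLoop l ↔ ∃ t : List Char, t.Sublist l ∧ t ≠ [] ∧ x = String.ofList t := by
  intro l
  induction l with
  | nil => intro x; simp [pvCombLoop]
  | cons c rest ih =>
    intro x
    unfold pvCombLoop
    constructor
    · intro h
      rcases List.mem_append.mp h with h1 | h2
      · rcases List.mem_cons.mp h1 with h | hm
        · exact ⟨[c], List.cons_sublist_cons.mpr (List.nil_sublist rest), by simp, h⟩
        · obtain ⟨j, hj, rfl⟩ := List.mem_map.mp hm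
          rw [pvCombination_eq_loop] at hj
          obtain ⟨t, hs, hne, rfl⟩ := (ih j).mp hj
          exact ⟨c :: t, List.cons_sublist_cons.mpr hs, by simp,
            (String.ofList_append (l₁ := [c]) (l₂ := t)).symm⟩
      · obtain ⟨t, hs, hne, rfl⟩ := (ih x).mp h2
        exact ⟨t, hs.cons c, hne, rfl⟩
    · rintro ⟨t, hs, hne, rfl⟩
      rcases List.sublist_cons_iff.mp hs with h | ⟨t', rfl, ht'⟩
      · exact List.mem_append_right _ ((ih _).mpr ⟨t, h, hne, rfl⟩)
      · rcases eq_or_ne t' [] with rfl | hne'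
        · exact List.mem_append_left _ (List.mem_cons.mpr (Or.inl rfl))
        · refine List.mem_append_left _ (List.mem_cons.mpr (Or.inr (List.mem_map.mpr
            ⟨String.ofList t', ?_, (String.ofList_append (l₁ := [c]) (l₂ := t')).symm⟩)))
          rw [pvCombination_eq_loop]
          exact (ih _).mpr ⟨t', ht', hne', rfl⟩

lemma mem_pvCombosLen :
    ∀ (l : List Char) (k : Nat) (t : List Char),
      t ∈ pvCombosLen k l ↔ t.Sublist l ∧ t.length = k := by
  intro l
  induction l with
  | nil =>
    intro k t
    cases k with
    | zero => simp [pvCombosLen, List.length_eq_zero_iff]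
    | succ k =>
      unfold pvCombosLen
      simp only [List.not_mem_nil, false_iff]
      rintro ⟨hs, hlen⟩
      simp [List.sublist_nil.mp hs] at hlen
  | cons c rest ih =>
    intro k t
    cases k with
    | zero =>
      unfold pvCombosLen
      constructor
      · intro h; simp only [List.mem_singleton] at h; subst h
        exact ⟨List.nil_sublist _, rfl⟩
      · rintro ⟨_, hlen⟩; simp [List.length_eq_zero_iff.mp hlen]
    | succ k =>
      unfold pvCombosLen
      constructor
      · intro h
        rcases List.mem_append.mp h with hm | h2
        · obtain ⟨t', ht', rfl⟩ := List.mem_map.mp hm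
          obtain ⟨hs, hlen⟩ := (ih k t').mp ht'
          exact ⟨List.cons_sublist_cons.mpr hs, by simp [hlen]⟩
        · obtain ⟨hs, hlen⟩ := (ih (k + 1) t).mp h2
          exact ⟨hs.cons c, hlen⟩
      · rintro ⟨hs, hlen⟩
        rcases List.sublist_cons_iff.mp hs with h | ⟨t', rfl, ht'⟩
        · exact List.mem_append_right _ ((ih (k + 1) t).mpr ⟨h, hlen⟩)
        · exact List.mem_append_left _ (List.mem_map.mpr
            ⟨t', (ih k t').mpr ⟨ht', by simpa using hlen⟩, rfl⟩)

lemma fold_add_eq_update (L : List (List Char)) (acc : PySem.Set String) :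
    L.foldl (fun a t => PySem.Set.add a (String.ofList t)) acc
      = PySem.Set.update acc (L.map String.ofList) :=
  (PySem.Set.update_map_eq_foldl_add (s := acc) (l := L) (f := String.ofList)).symm

lemma mem_bigfold (l : List Char) (x : String) :
    ∀ (rs : List Int) (s0 : PySem.Set String),
      x ∈ rs.foldl (fun acc r => (pvCombosLen r.toNat l).foldl
            (fun a t => PySem.Set.add a (String.ofList t)) acc) s0
        ↔ x ∈ s0 ∨ ∃ r ∈ rs, ∃ t ∈ pvCombosLen r.toNat l, x = String.ofList t := by
  intro rs
  induction rs with
  | nil => simp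
  | cons r rs ih =>
    intro s0
    rw [List.foldl_cons, ih, fold_add_eq_update, PySem.Set.mem_update]
    simp only [List.mem_map, List.mem_cons]
    constructor
    · rintro ((h | ⟨t, ht, hx⟩) | ⟨r', hr', t, ht, hx⟩)
      · exact Or.inl h
      · exact Or.inr ⟨r, Or.inl rfl, t, ht, hx.symm⟩
      · exact Or.inr ⟨r', Or.inr hr', t, ht, hx⟩
    · rintro (h | ⟨r', rfl | hr', t, ht, hx⟩)
      · exact Or.inl (Or.inl h)
      · exact Or.inl (Or.inr ⟨t, ht, hx.symm⟩)
      · exact Or.inr ⟨r', hr', t, ht, hx⟩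

lemma nodup_bigfold (l : List Char) :
    ∀ (rs : List Int) (s0 : PySem.Set String), s0.Nodup →
      (rs.foldl (fun acc r => (pvCombosLen r.toNat l).foldl
        (fun a t => PySem.Set.add a (String.ofList t)) acc) s0).Nodup := by
  intro rs
  induction rs with
  | nil => intro s0 h; simpa
  | cons r rs ih =>
    intro s0 h
    rw [List.foldl_cons, fold_add_eq_update]
    exact ih _ (PySem.Set.nodup_update _ _ h)

-- ===== VERDICT (by name: the statement is the Claim_ definition above) =====
theorem Combination2_spec : Claim_equal_Combination2 := by
  unfold Claim_equal_Combination2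
  intro s _
  unfold Spec_Combination2 Combination2 Combination2_alt
  by_cases hs : s = ""
  · simp [hs]
  · simp only [if_neg hs]
    congr 1
    rw [PySem.List.sorted_id_eq_sorted_id_iff_perm]
    apply (List.perm_ext_iff_of_nodup (PySem.Set.nodup_ofList _)
      (nodup_bigfold _ _ _ (by simp [PySem.Set.empty]))).mpr
    intro x
    rw [PySem.Set.mem_ofList, pvCombination_eq_loop, mem_pvCombLoop _ x, mem_bigfold]
    simp only [PySem.Set.empty, List.not_mem_nil, false_or]
    constructor
    · rintro ⟨t, hsub, hne, rfl⟩
      refine ⟨(t.length : Int), ?_, t, (mem_pvCombosLen _ _ t).mpr ⟨hsub, by simp⟩, rfl⟩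
      rw [PySem.List.mem_pyRange_one]
      have h1 : 0 < t.length := List.length_pos_iff.mpr hne
      have h2 : t.length ≤ s.toList.length := hsub.length_le
      omega
    · rintro ⟨r, hr, t, ht, rfl⟩
      rw [PySem.List.mem_pyRange_one] at hr
      obtain ⟨hsub, hlen⟩ := (mem_pvCombosLen _ _ t).mp ht
      refine ⟨t, hsub, ?_, rfl⟩
      intro h
      subst h
      simp at hlen
      omega
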